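-- pv_equiv track=rewrite | github.com/Vesihiisi/SMV | commons/utils.py | character_cleanup
-- ===== SOURCE A (Python) =====
-- def character_cleanup(txt):
--     glossary = {
--         "&Aacute;": "Á",
--         "&aacute;": "á",
--         "&Aring;": "Å",
--         "&Auml;": "Ä",
--         "&auml;": "ä",
--         "&apos;": "'",
--         "&eacute;": "é",
--         "&egrave;": "è",
--         "&Egrave;": "È",
--         "&oacute;": "ó",
--         "&uuml;": "ü",
--     }
--     for key in glossary.keys():
--         txt = txt.replace(key, glossary[key])
--     return txt
-- ===== SOURCE B (Python) =====
-- def character_cleanup(txt):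
--     glossary = {
--         "&Aacute;": "Á",
--         "&aacute;": "á",
--         "&Aring;": "Å",
--         "&Auml;": "Ä",
--         "&auml;": "ä",
--         "&apos;": "'",
--         "&eacute;": "é",
--         "&egrave;": "è",
--         "&Egrave;": "È",
--         "&oacute;": "ó",
--         "&uuml;": "ü",
--     }
--     out = []
--     i = 0
--     n = len(txt)
--     while i < n:
--         c = txt[i]
--         if c == "&":
--             for key, val in glossary.items():
--                 if txt.startswith(key, i):
--                     out.append(val)
--                     i += len(key)
--                     break
--             else:
--                 out.append(c)
--                 i += 1
--         else:
--             out.append(c)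
--             i += 1
--     return "".join(out)
-- ===== Notes on version B (the rewrite author's own statement) =====
-- stated objective: alternative
-- what changed: Replaces the eleven successive full-string str.replace passes (each copying the whole string) by one left-to-right scan that, at each ampersand, tries the glossary entries with startswith, emits the replacement and jumps past the entity, building the output in a list joined once.
import Mathlib
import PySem

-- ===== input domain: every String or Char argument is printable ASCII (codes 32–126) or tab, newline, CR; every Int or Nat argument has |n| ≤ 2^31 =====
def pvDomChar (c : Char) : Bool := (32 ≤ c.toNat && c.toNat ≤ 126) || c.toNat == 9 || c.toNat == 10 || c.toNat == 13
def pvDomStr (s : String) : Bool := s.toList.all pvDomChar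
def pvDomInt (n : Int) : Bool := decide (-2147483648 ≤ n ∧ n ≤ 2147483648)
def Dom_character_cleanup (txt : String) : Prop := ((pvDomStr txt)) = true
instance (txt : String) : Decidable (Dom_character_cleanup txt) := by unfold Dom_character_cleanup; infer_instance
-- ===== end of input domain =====

-- B replaces A's eleven successive full-string replace passes by one left-to-right scan that
-- tries the glossary entries only at an ampersand and jumps past each matched entity (objective: alternative).

-- ===== PORT A =====
def pvGlossary : PySem.Dict String String :=
  PySem.Dict.ofList
    [("&Aacute;", "Á"), ("&aacute;", "á"), ("&Aring;", "Å"), ("&Auml;", "Ä"),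
     ("&auml;", "ä"), ("&apos;", "'"), ("&eacute;", "é"), ("&egrave;", "è"),
     ("&Egrave;", "È"), ("&oacute;", "ó"), ("&uuml;", "ü")]

-- 'for key in glossary.keys(): txt = txt.replace(key, glossary[key])';
-- glossary[key] cannot raise (key comes from glossary.keys()), so getD with "" is exact.
def character_cleanup (txt : String) : String :=
  pvGlossary.keys.foldl (fun t key => PySem.Str.replace t key (pvGlossary.getD key "")) txt

-- ===== PORT B =====
-- glossary.items() of Source B at the character level; each value is the single replacement character

def pvPairs : List (List Char × Char) :=
  [(['&','A','a','c','u','t','e',';'], 'Á'), (['&','a','a','c','u','t','e',';'], 'á'),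
   (['&','A','r','i','n','g',';'], 'Å'), (['&','A','u','m','l',';'], 'Ä'),
   (['&','a','u','m','l',';'], 'ä'), (['&','a','p','o','s',';'], '\''),
   (['&','e','a','c','u','t','e',';'], 'é'), (['&','e','g','r','a','v','e',';'], 'è'),
   (['&','E','g','r','a','v','e',';'], 'È'), (['&','o','a','c','u','t','e',';'], 'ó'),
   (['&','u','u','m','l',';'], 'ü')]

-- the inner 'for key, val in glossary.items(): if txt.startswith(key, i)' loop
def pvFindKey (l : List Char) : Option (List Char × Char) :=
  pvPairs.find? (fun p => p.1.isPrefixOf l)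

-- the 'while i < n' scan of Source B; 'i += len(key)' is dropping the matched key
def pvScan : List Char → List Char
  | [] => []
  | c :: t =>
    if c = '&' then
      match pvFindKey (c :: t) with
      | some (k, v) => v :: pvScan (t.drop (k.length - 1))
      | none => c :: pvScan t
    else c :: pvScan t
termination_by l => l.length
decreasing_by
  · simp
  · simp
  · simp


def character_cleanup_alt (txt : String) : String :=
  String.ofList (pvScan txt.toList)

-- ===== PRECONDITION & SPEC =====
def Spec_character_cleanup (txt : String) (out : String) : Prop := out = character_cleanup_alt txt
instance (txt : String) (out : String) : Decidable (Spec_character_cleanup txt out) := by unfold Spec_character_cleanup; infer_instance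

-- ===== CLAIM (what is proved, stated in full; the proofs are below) =====
def Claim_equal_character_cleanup : Prop := ∀ (txt : String), Dom_character_cleanup txt → Spec_character_cleanup txt (character_cleanup txt)

-- ===== LEMMAS AND PROOFS =====

-- proof-side model of one str.replace pass (Python's left-to-right non-overlapping replace)
def pvRep (old nw : List Char) : List Char → List Char
  | [] => []
  | c :: t =>
    if old <+: (c :: t) ∧ old ≠ [] then nw ++ pvRep old nw (t.drop (old.length - 1))
    else c :: pvRep old nw t
termination_by l => l.length
decreasing_by
  · simp
  · simp
lemma pvRep_nil (old nw : List Char) : pvRep old nw [] = [] := by simp [pvRep]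
lemma pvRep_pos (old nw : List Char) (c : Char) (t : List Char)
    (h : old <+: (c :: t)) (h0 : old ≠ []) :
    pvRep old nw (c :: t) = nw ++ pvRep old nw (t.drop (old.length - 1)) := by
  rw [pvRep, if_pos ⟨h, h0⟩]
lemma pvRep_neg (old nw : List Char) (c : Char) (t : List Char)
    (h : ¬ old <+: (c :: t)) :
    pvRep old nw (c :: t) = c :: pvRep old nw t := by
  rw [pvRep, if_neg (by tauto)]

lemma pv_go_spec (old nw : List Char) (h0 : old ≠ []) :
    ∀ fuel l acc, l.length ≤ fuel →
      PySem.Chars.replace.go old nw fuel l acc = acc.reverse ++ pvRep old nw l := by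
  intro fuel
  induction fuel with
  | zero =>
    intro l acc hl
    have : l = [] := List.length_eq_zero_iff.mp (Nat.le_zero.mp hl)
    subst this
    simp [PySem.Chars.replace.go, pvRep]
  | succ n ih =>
    intro l acc hl
    match l with
    | [] => simp [PySem.Chars.replace.go, pvRep]
    | c :: t =>
      rw [PySem.Chars.replace.go]
      by_cases hp : old.isPrefixOf (c :: t)
      · rw [if_pos hp]
        have hpre : old <+: (c :: t) := List.isPrefixOf_iff_prefix.mp hp
        obtain ⟨o, os, rfl⟩ : ∃ o os, old = o :: os := by
          cases old with
          | nil => exact absurd rfl h0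
          | cons o os => exact ⟨o, os, rfl⟩
        have hdrop : (c :: t).drop (o :: os).length = t.drop ((o :: os).length - 1) := by
          simp
        rw [hdrop, ih _ _ (by simp at hl ⊢; omega)]
        rw [pvRep_pos _ _ _ _ hpre h0]
        simp
      · rw [if_neg hp]
        rw [ih _ _ (by simp at hl ⊢; omega)]
        rw [pvRep_neg _ _ _ _ (fun hc => hp (List.isPrefixOf_iff_prefix.mpr hc))]
        simp

lemma pv_replace_eq (s old nw : List Char) (h0 : old ≠ []) :
    PySem.Chars.replace s old nw = pvRep old nw s := by
  rw [PySem.Chars.replace, if_neg (by simp [List.isEmpty_iff, h0])]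
  simpa using pv_go_spec old nw h0 s.length s [] (le_refl _)

lemma pvRep_prefix_inv (old : List Char) (v : Char) (h0 : old ≠ []) :
    ∀ l w, v ∉ w → w <+: pvRep old [v] l → w <+: l := by
  intro l
  induction l using pvRep.induct (old := old) with
  | case1 => intro w _ h; rw [pvRep_nil] at h; simpa using List.prefix_nil.mp h
  | case2 c t hcond ih =>
    intro w hv hw
    obtain ⟨hpre, hne⟩ := hcond
    rw [pvRep_pos _ _ _ _ hpre hne] at hw
    match w with
    | [] => exact List.nil_prefix
    | a :: w' =>
      have := (List.cons_prefix_cons.mp hw).1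
      exact absurd (this ▸ List.mem_cons_self) hv
  | case3 c t hcond ih =>
    intro w hv hw
    have hnp : ¬ old <+: (c :: t) := fun hc => hcond ⟨hc, h0⟩
    rw [pvRep_neg _ _ _ _ hnp] at hw
    match w with
    | [] => exact List.nil_prefix
    | a :: w' =>
      obtain ⟨rfl, hw'⟩ := List.cons_prefix_cons.mp hw
      exact List.cons_prefix_cons.mpr ⟨rfl, ih w' (fun hm => hv (List.mem_cons_of_mem _ hm)) hw'⟩

lemma pvRep_pass (old nw : List Char) (hh : old.head? = some '&') :
    ∀ s Y, ¬ old <+: (s ++ Y) → (∀ c ∈ s.tail, c ≠ '&') →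
      pvRep old nw (s ++ Y) = s ++ pvRep old nw Y := by
  intro s
  induction s with
  | nil => intro Y _ _; rfl
  | cons a s' ih =>
    intro Y hnp htl
    rw [List.cons_append, pvRep_neg _ _ _ _ (by simpa using hnp)]
    cases s' with
    | nil => rfl
    | cons b s'' =>
      have hb : b ≠ '&' := htl b List.mem_cons_self
      have hnp' : ¬ old <+: ((b :: s'') ++ Y) := by
        intro hc
        obtain ⟨o, os, rfl⟩ : ∃ o os, old = o :: os := by
          cases old with
          | nil => simp at hh
          | cons o os => exact ⟨o, os, rfl⟩
        have ho : o = '&' := by simpa using hh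
        have := (List.cons_prefix_cons.mp hc).1
        exact hb (by rw [← this, ho])
      rw [ih Y hnp' (fun c hc => htl c (List.mem_cons_of_mem _ hc))]
      simp

lemma pvRep_self (k : List Char) (v : Char) (hk : k ≠ []) (Z : List Char) :
    pvRep k [v] (k ++ Z) = v :: pvRep k [v] Z := by
  obtain ⟨a, ktail, rfl⟩ : ∃ a kt, k = a :: kt := by
    cases k with
    | nil => exact absurd rfl hk
    | cons a kt => exact ⟨a, kt, rfl⟩
  rw [List.cons_append, pvRep_pos _ _ _ _ (by simp [List.prefix_append]) hk]
  simp

def pvApply (ps : List (List Char × Char)) (l : List Char) : List Char :=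
  ps.foldl (fun t p => pvRep p.1 [p.2] t) l

lemma pvApply_nil : ∀ ps : List (List Char × Char), pvApply ps [] = [] := by
  intro ps
  induction ps with
  | nil => rfl
  | cons p ps ih => simpa [pvApply, List.foldl_cons, pvRep_nil] using ih

lemma pvApply_cons (p : List Char × Char) (ps : List (List Char × Char)) (l : List Char) :
    pvApply (p :: ps) l = pvApply ps (pvRep p.1 [p.2] l) := rfl

lemma pvApply_split (pre post : List (List Char × Char)) (k : List Char) (v : Char) (l : List Char) :
    pvApply (pre ++ (k, v) :: post) l = pvApply post (pvRep k [v] (pvApply pre l)) := by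
  show (pre ++ (k, v) :: post).foldl (fun t p => pvRep p.1 [p.2] t) l = _
  rw [List.foldl_append, List.foldl_cons]
  rfl

lemma pvK_shape : ∀ p ∈ pvPairs, p.1 ≠ [] ∧ p.1.head? = some '&' ∧ ∀ c ∈ p.1.tail, c ≠ '&' := by
  have h : (pvPairs.all fun p => (!p.1.isEmpty) && (p.1.head? == some '&')
      && p.1.tail.all (fun c => !(c == '&'))) = true := by rfl
  intro p hp
  have hb := List.all_eq_true.mp h p hp
  simp only [Bool.and_eq_true, Bool.not_eq_true', beq_iff_eq, List.all_eq_true] at hb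
  obtain ⟨⟨h1, h2⟩, h3⟩ := hb
  exact ⟨fun he => by simp [he] at h1, h2, fun c hc => by simpa using h3 c hc⟩

lemma pvK_nopref : ∀ p ∈ pvPairs, ∀ q ∈ pvPairs, p.1 = q.1 ∨ (¬ p.1 <+: q.1 ∧ ¬ q.1 <+: p.1) := by
  have h : (pvPairs.all fun p => pvPairs.all fun q =>
      (p.1 == q.1) || (!(p.1.isPrefixOf q.1) && !(q.1.isPrefixOf p.1))) = true := by rfl
  intro p hp q hq
  have := (List.all_eq_true.mp ((List.all_eq_true.mp h) p hp)) q hq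
  simp only [Bool.or_eq_true, Bool.and_eq_true, Bool.not_eq_true', beq_iff_eq] at this
  rcases this with h1 | ⟨h2, h3⟩
  · exact Or.inl h1
  · exact Or.inr ⟨by simpa using (List.isPrefixOf_iff_prefix).not.mp (by simp [h2]),
                  by simpa using (List.isPrefixOf_iff_prefix).not.mp (by simp [h3])⟩

lemma pvK_val : ∀ p ∈ pvPairs, ∀ q ∈ pvPairs, p.2 ∉ q.1 := by
  have h : (pvPairs.all fun p => pvPairs.all fun q => !(q.1.contains p.2)) = true := by rfl
  intro p hp q hq
  have hb := (List.all_eq_true.mp (List.all_eq_true.mp h p hp)) q hq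
  simpa using hb
lemma pvK_amp : ∀ p ∈ pvPairs, p.2 ≠ '&' := by
  have h : (pvPairs.all fun p => !(p.2 == '&')) = true := by rfl
  intro p hp
  simpa using List.all_eq_true.mp h p hp

lemma pvApply_noMatch : ∀ ps : List (List Char × Char), (∀ p ∈ ps, p ∈ pvPairs) →
    ∀ c t, (∀ p ∈ ps, ¬ p.1 <+: (c :: t)) →
      pvApply ps (c :: t) = c :: pvApply ps t := by
  intro ps
  induction ps with
  | nil => intro _ c t _; rfl
  | cons p ps ih =>
    intro hps c t hnm
    rw [pvApply_cons, pvRep_neg _ _ _ _ (hnm p List.mem_cons_self), pvApply_cons]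
    exact ih (fun q hq => hps q (List.mem_cons_of_mem _ hq)) c (pvRep p.1 [p.2] t)
      (by
        intro q hq hc
        have hq' := hps q (List.mem_cons_of_mem _ hq)
        obtain ⟨hqne, _, _⟩ := pvK_shape q hq'
        match hqeq : q.1 with
        | [] => exact hqne hqeq
        | a :: w =>
          rw [hqeq] at hc
          obtain ⟨rfl, hw⟩ := List.cons_prefix_cons.mp hc
          have hv : p.2 ∉ q.1 := pvK_val p (hps p List.mem_cons_self) q hq'
          have hw' : w <+: t := pvRep_prefix_inv p.1 p.2
            (pvK_shape p (hps p List.mem_cons_self)).1 t w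
            (fun hm => hv (hqeq ▸ List.mem_cons_of_mem _ hm)) hw
          exact hnm q (List.mem_cons_of_mem _ hq) (hqeq ▸ List.cons_prefix_cons.mpr ⟨rfl, hw'⟩))

lemma pvApply_pass (ki : List Char) (htl : ∀ c ∈ ki.tail, c ≠ '&') :
    ∀ ps, (∀ p ∈ ps, p ∈ pvPairs) → (∀ p ∈ ps, ¬ p.1 <+: ki ∧ ¬ ki <+: p.1) →
      ∀ Y, pvApply ps (ki ++ Y) = ki ++ pvApply ps Y := by
  intro ps
  induction ps with
  | nil => intro _ _ Y; rfl
  | cons p ps ih =>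
    intro hps hcond Y
    have hp := hps p List.mem_cons_self
    obtain ⟨hpne, hph, _⟩ := pvK_shape p hp
    have hnp : ¬ p.1 <+: (ki ++ Y) := by
      intro hc
      rcases List.prefix_or_prefix_of_prefix hc (List.prefix_append ki Y) with h | h
      · exact (hcond p List.mem_cons_self).1 h
      · exact (hcond p List.mem_cons_self).2 h
    rw [pvApply_cons, pvRep_pass p.1 [p.2] hph ki Y hnp htl, pvApply_cons]
    exact ih (fun q hq => hps q (List.mem_cons_of_mem _ hq))
      (fun q hq => hcond q (List.mem_cons_of_mem _ hq)) (pvRep p.1 [p.2] Y)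

lemma pvApply_passChar (v : Char) (hv : v ≠ '&') :
    ∀ ps, (∀ p ∈ ps, p ∈ pvPairs) → ∀ Y, pvApply ps (v :: Y) = v :: pvApply ps Y := by
  intro ps
  induction ps with
  | nil => intro _ Y; rfl
  | cons p ps ih =>
    intro hps Y
    have hp := hps p List.mem_cons_self
    obtain ⟨hpne, hph, _⟩ := pvK_shape p hp
    have hnp : ¬ p.1 <+: (v :: Y) := by
      intro hc
      obtain ⟨o, os, hos⟩ := List.exists_cons_of_ne_nil hpne
      rw [hos] at hc hph
      have ho : o = '&' := by simpa using hph
      exact hv (((List.cons_prefix_cons.mp hc).1 ▸ ho : v = '&'))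
    rw [pvApply_cons, pvRep_neg _ _ _ _ hnp, pvApply_cons]
    exact ih (fun q hq => hps q (List.mem_cons_of_mem _ hq)) (pvRep p.1 [p.2] Y)

lemma pvMain : ∀ l : List Char, pvApply pvPairs l = pvScan l := by
  have H : ∀ n (l : List Char), l.length ≤ n → pvApply pvPairs l = pvScan l := by
    intro n
    induction n with
    | zero =>
      intro l hl
      have : l = [] := List.length_eq_zero_iff.mp (Nat.le_zero.mp hl)
      subst this
      rw [pvApply_nil, pvScan]
    | succ n ih =>
      intro l hl
      match l with
      | [] => rw [pvApply_nil, pvScan]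
      | c :: t =>
        have ht : t.length ≤ n := by simpa using hl
        cases hf : pvFindKey (c :: t) with
        | none =>
          have hnm : ∀ p ∈ pvPairs, ¬ p.1 <+: (c :: t) := by
            intro p hp hpre
            exact List.find?_eq_none.mp hf p hp (List.isPrefixOf_iff_prefix.mpr hpre)
          rw [pvApply_noMatch pvPairs (fun p hp => hp) c t hnm, ih t ht]
          conv_rhs => rw [pvScan]
          by_cases hc : c = '&'
          · subst hc
            rw [if_pos rfl, hf]
          · rw [if_neg hc]
        | some kv =>
          obtain ⟨k, v⟩ := kv
          obtain ⟨hpk, pre, post, heq, hprem⟩ := List.find?_eq_some_iff_append.mp hf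
          have hmem : (k, v) ∈ pvPairs := heq ▸ List.mem_append_right _ List.mem_cons_self
          obtain ⟨hkne, hkh, hktl⟩ := pvK_shape (k, v) hmem
          dsimp only at hpk hkne hkh hktl hprem
          have hpre : k <+: (c :: t) := List.isPrefixOf_iff_prefix.mp hpk
          obtain ⟨a, ktail, hkeq⟩ := List.exists_cons_of_ne_nil hkne
          have ha : a = '&' := by rw [hkeq] at hkh; simpa using hkh
          obtain ⟨r, hr⟩ := hpre
          rw [hkeq, List.cons_append] at hr
          injection hr with h1 h2
          have hc : c = '&' := by rw [← h1, ha]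
          have hrlen : r.length ≤ t.length := by rw [← h2]; simp
          have hdropr : t.drop (k.length - 1) = r := by
            rw [← h2, hkeq]
            simp
          have hclt : (c :: t) = k ++ r := by rw [hkeq, List.cons_append, h1, h2]
          have hpremem : ∀ p ∈ pre, p ∈ pvPairs := fun p hp => heq ▸ List.mem_append_left _ hp
          have hpostmem : ∀ p ∈ post, p ∈ pvPairs :=
            fun p hp => heq ▸ List.mem_append_right _ (List.mem_cons_of_mem _ hp)
          have hpreconds : ∀ p ∈ pre, ¬ p.1 <+: k ∧ ¬ k <+: p.1 := by
            intro p hp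
            have hpmem : p ∈ pvPairs := hpremem p hp
            have hnpl : ¬ p.1 <+: (c :: t) := by
              intro hcp
              have hb := hprem p hp
              have ht' : p.1.isPrefixOf (c :: t) = true := List.isPrefixOf_iff_prefix.mpr hcp
              simp [ht'] at hb
            rcases pvK_nopref p hpmem (k, v) hmem with he | hn
            · exact absurd (hclt ▸ (he ▸ List.prefix_append k r : p.1 <+: k ++ r)) hnpl
            · exact hn
          have hL : pvApply pvPairs (c :: t) = v :: pvApply pvPairs r := by
            rw [hclt, heq, pvApply_split, pvApply_pass k hktl pre hpremem hpreconds r,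
              pvRep_self k v hkne, pvApply_passChar v (pvK_amp (k, v) hmem) post hpostmem,
              ← pvApply_split, ← heq]
          have hR : pvScan (c :: t) = v :: pvScan (t.drop (k.length - 1)) := by
            rw [pvScan, if_pos hc, hf]
          rw [hL, hR, hdropr, ih r (le_trans hrlen ht)]
  intro l
  exact H l.length l (le_refl _)

lemma pv_keys : pvGlossary.keys =
    ["&Aacute;", "&aacute;", "&Aring;", "&Auml;", "&auml;", "&apos;",
     "&eacute;", "&egrave;", "&Egrave;", "&oacute;", "&uuml;"] := by rfl

lemma pv_str_rep (s old nw : String) (h0 : old.toList ≠ []) :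
    (PySem.Str.replace s old nw).toList = pvRep old.toList nw.toList s.toList := by
  rw [PySem.Str.toList_replace, pv_replace_eq _ _ _ h0]

lemma pvA_toList (txt : String) :
    (character_cleanup txt).toList = pvApply pvPairs txt.toList := by
  have h : character_cleanup txt = PySem.Str.replace (PySem.Str.replace (PySem.Str.replace (PySem.Str.replace (PySem.Str.replace (PySem.Str.replace (PySem.Str.replace (PySem.Str.replace (PySem.Str.replace (PySem.Str.replace (PySem.Str.replace txt "&Aacute;" "Á") "&aacute;" "á") "&Aring;" "Å") "&Auml;" "Ä") "&auml;" "ä") "&apos;" "'") "&eacute;" "é") "&egrave;" "è") "&Egrave;" "È") "&oacute;" "ó") "&uuml;" "ü" := by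
    rw [character_cleanup, pv_keys]; rfl
  rw [h, pv_str_rep _ _ _ (by decide), pv_str_rep _ _ _ (by decide),
    pv_str_rep _ _ _ (by decide), pv_str_rep _ _ _ (by decide), pv_str_rep _ _ _ (by decide),
    pv_str_rep _ _ _ (by decide), pv_str_rep _ _ _ (by decide), pv_str_rep _ _ _ (by decide),
    pv_str_rep _ _ _ (by decide), pv_str_rep _ _ _ (by decide), pv_str_rep _ _ _ (by decide)]
  rfl

-- ===== VERDICT (by name: the statement is the Claim_ definition above) =====
theorem character_cleanup_spec : Claim_equal_character_cleanup := by
  intro txt _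
  unfold Spec_character_cleanup character_cleanup_alt
  apply String.toList_inj.mp
  rw [String.toList_ofList, pvA_toList, pvMain]
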